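-- pv_equiv track=rewrite | github.com/Alyssia4/Reposit-rio | aula3/lista3/exc11.py | Senha
-- ===== SOURCE A (Python) =====
-- def Senha(texto):
--     senha = ""
--     count = 0
--     for c in texto + " ":
--         if c != " ":
--             count += 1
--         else:
--             if count:
--                 senha += str(count)
--                 count = 0
--     return senha
-- ===== SOURCE B (Python) =====
-- def Senha(texto):
--     return "".join(str(len(w)) for w in texto.split(" ") if w)
-- ===== Notes on version B (the rewrite author's own statement) =====
-- stated objective: idiomatic
-- what changed: B splits the string on the space character and joins the lengths of the nonempty tokens, replacing A's char-by-char counter loop with a tokenize-then-map two-stage pass.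
import Mathlib
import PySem

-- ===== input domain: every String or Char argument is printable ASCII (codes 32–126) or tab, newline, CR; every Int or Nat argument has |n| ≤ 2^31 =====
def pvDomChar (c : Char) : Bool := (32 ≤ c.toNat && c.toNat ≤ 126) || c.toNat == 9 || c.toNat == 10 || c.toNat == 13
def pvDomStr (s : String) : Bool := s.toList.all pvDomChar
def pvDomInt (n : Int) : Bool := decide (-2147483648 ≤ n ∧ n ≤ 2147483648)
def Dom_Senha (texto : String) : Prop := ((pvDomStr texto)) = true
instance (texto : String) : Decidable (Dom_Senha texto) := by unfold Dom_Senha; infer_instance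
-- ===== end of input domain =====

-- B splits on the space character and joins the lengths of the nonempty tokens (idiomatic two-stage pass);
-- A runs a char-by-char counter loop. Proved equal on all inputs.

-- ===== PORT A =====
-- 'for c in texto + " "' = fold over the characters of texto followed by one ' ';
-- state (senha, count); 'if count:' is count ≠ 0; str(count) = PySem.Int.toChars.
def Senha (texto : String) : String :=
  String.mk ((texto.toList ++ [' ']).foldl
    (fun (st : List Char × Int) c =>
      if c ≠ ' ' then (st.1, st.2 + 1)
      else if st.2 ≠ 0 then (st.1 ++ PySem.Int.toChars st.2, (0 : Int)) else st)
    ([], 0)).1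

-- ===== PORT B =====
-- texto.split(" ") with a single-char separator is List.splitOn ' ' on the characters (exact for this
-- nonempty one-char sep); '"".join(str(len(w)) for w in … if w)' = join [] of toChars of the lengths
-- of the nonempty tokens.
def Senha_alt (texto : String) : String :=
  String.mk (PySem.Chars.join []
    (((texto.toList.splitOn ' ').filter (fun w => w ≠ [])).map
      (fun w => PySem.Int.toChars (w.length : Int))))

-- ===== PRECONDITION & SPEC =====
def Spec_Senha (texto : String) (out : String) : Prop := out = Senha_alt texto
instance (texto : String) (out : String) : Decidable (Spec_Senha texto out) := by unfold Spec_Senha; infer_instance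

-- ===== CLAIM (what is proved, stated in full; the proofs are below) =====
def Claim_equal_Senha : Prop := ∀ (texto : String), Dom_Senha texto → Spec_Senha texto (Senha texto)

-- ===== LEMMAS AND PROOFS =====

-- the loop body of port A, named for the proofs
def pvStep (st : List Char × Int) (c : Char) : List Char × Int :=
  if c ≠ ' ' then (st.1, st.2 + 1)
  else if st.2 ≠ 0 then (st.1 ++ PySem.Int.toChars st.2, (0 : Int)) else st

-- B's output at the token-list level
def pvEmit (ws : List (List Char)) : List Char :=
  ((ws.filter (fun w => w ≠ [])).map (fun w => PySem.Int.toChars (w.length : Int))).flatten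

-- B's output when a run of n non-space chars is already pending before the first token
def pvEmitA (n : Nat) (ws : List (List Char)) : List Char :=
  match ws with
  | [] => []
  | w :: ws' => (if n + w.length = 0 then [] else PySem.Int.toChars ((n + w.length : Nat) : Int)) ++ pvEmit ws'

theorem pvEmitA_zero (ws : List (List Char)) : pvEmitA 0 ws = pvEmit ws := by
  cases ws with
  | nil => rfl
  | cons w ws' =>
    by_cases h : w = []
    · subst h; simp [pvEmitA, pvEmit]
    · have : w.length ≠ 0 := by simpa using h
      simp [pvEmitA, pvEmit, h, this]

theorem pvLoop (cs : List Char) : ∀ (acc : List Char) (n : Nat),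
    ((cs ++ [' ']).foldl pvStep (acc, (n : Int))).1
      = acc ++ pvEmitA n (cs.splitOn ' ') := by
  induction cs with
  | nil =>
    intro acc n
    by_cases h : n = 0
    · subst h; simp [pvStep, pvEmitA, List.splitOn, List.splitOnP_nil, pvEmit]
    · have hn : (n : Int) ≠ 0 := by exact_mod_cast h
      simp [pvStep, pvEmitA, List.splitOn, List.splitOnP_nil, pvEmit, h]
  | cons c cs ih =>
    intro acc n
    by_cases hc : c = ' '
    · subst hc
      have hsplit : (' ' :: cs).splitOn ' ' = [] :: cs.splitOn ' ' := by
        simp [List.splitOn, List.splitOnP_cons]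
      by_cases h : n = 0
      · subst h
        have hstep : pvStep (acc, ((0:Nat) : Int)) ' ' = (acc, ((0:Nat) : Int)) := by
          simp [pvStep]
        rw [List.cons_append, List.foldl_cons, hstep, ih acc 0, hsplit, pvEmitA_zero]
        simp [pvEmitA, pvEmit]
      · have hn : (n : Int) ≠ 0 := by exact_mod_cast h
        have hstep : pvStep (acc, (n : Int)) ' '
            = (acc ++ PySem.Int.toChars (n : Int), ((0:Nat) : Int)) := by
          simp [pvStep]
          exact fun h0 => absurd h0 h
        rw [List.cons_append, List.foldl_cons, hstep, ih _ 0, hsplit, pvEmitA_zero]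
        simp [pvEmitA, h, List.append_assoc]
    · obtain ⟨w, ws, hw⟩ : ∃ w ws, cs.splitOn ' ' = w :: ws := by
        cases h : cs.splitOn ' ' with
        | nil => exact absurd h (List.splitOnP_ne_nil _ cs)
        | cons w ws => exact ⟨w, ws, rfl⟩
      have hsplit : (c :: cs).splitOn ' ' = (c :: w) :: ws := by
        simp only [List.splitOn] at hw ⊢
        rw [List.splitOnP_cons, hw]
        simp [hc]
      have hstep : pvStep (acc, (n : Int)) c = (acc, ((n + 1 : Nat) : Int)) := by
        simp [pvStep, hc]
      rw [List.cons_append, List.foldl_cons, hstep, ih acc (n + 1), hw, hsplit]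
      have harith : (n + 1) + w.length = n + (c :: w).length := by
        simp [List.length_cons]; omega
      simp [pvEmitA, harith]

theorem pvJoinNil (parts : List (List Char)) : PySem.Chars.join [] parts = parts.flatten := by
  induction parts with
  | nil => rfl
  | cons w ws ih =>
    cases ws with
    | nil => simp [PySem.Chars.join, List.intercalate]
    | cons v vs =>
      simp only [PySem.Chars.join, List.intercalate, List.intersperse] at *
      simp_all

-- ===== VERDICT (by name: the statement is the Claim_ definition above) =====
theorem Senha_spec : Claim_equal_Senha := by
  intro texto _
  unfold Spec_Senha Senha Senha_alt
  have := pvLoop texto.toList [] 0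
  simp only [Nat.cast_zero] at this
  rw [show (fun (st : List Char × Int) c =>
      if c ≠ ' ' then (st.1, st.2 + 1)
      else if st.2 ≠ 0 then (st.1 ++ PySem.Int.toChars st.2, (0 : Int)) else st) = pvStep from rfl,
    this, pvJoinNil, pvEmitA_zero]
  rfl
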